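-- pv_equiv track=rewrite | github.com/Im-Junhyuk/AlgorithmTraining | 백준/Bronze/2231. 분해합/분해합.py | find_constructor
-- ===== SOURCE A (Python) =====
-- def find_constructor(num):
--     for i in range(num+1):
--         j = i
--         num_list = []
--         while j>0:
--             k = j%10
--             j = j//10
--             num_list.append(k)
--         if sum(num_list) + i == num:
--             return i
--     return 0
-- ===== SOURCE B (Python) =====
-- def find_constructor(num):
--     # count digits of num
--     d = 0
--     t = num
--     while t > 0:
--         d += 1
--         t //= 10
--     start = num - 9 * d
--     if start < 0:
--         start = 0
--     for i in range(start, num + 1):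
--         s = 0
--         j = i
--         while j > 0:
--             s += j % 10
--             j //= 10
--         if s + i == num:
--             return i
--     return 0
-- ===== Notes on version B (the rewrite author's own statement) =====
-- stated objective: faster
-- what changed: Instead of scanning all candidates upward from the bottom, B counts the digits of num and scans only the short feasible tail window below num whose width is the maximal possible digit sum.
import Mathlib
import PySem

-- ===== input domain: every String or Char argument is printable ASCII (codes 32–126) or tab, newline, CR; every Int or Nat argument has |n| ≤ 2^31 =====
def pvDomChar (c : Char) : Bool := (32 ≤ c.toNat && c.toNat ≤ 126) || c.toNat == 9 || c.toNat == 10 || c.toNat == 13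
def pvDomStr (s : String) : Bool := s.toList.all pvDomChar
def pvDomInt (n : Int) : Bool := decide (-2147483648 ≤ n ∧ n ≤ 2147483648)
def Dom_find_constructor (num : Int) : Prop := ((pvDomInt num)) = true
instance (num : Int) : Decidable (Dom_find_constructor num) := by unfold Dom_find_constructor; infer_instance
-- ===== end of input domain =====

-- B scans only the feasible window [num-9*digits(num), num] instead of [0, num]: asymptotically faster, same result.

-- termination helper for the digit loops (cited by the ports' decreasing_by)
theorem pvFdiv10_toNat_lt (j : Int) (h : 0 < j) :
    (PySem.Int.floordiv j 10).toNat < j.toNat := by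
  rw [PySem.Int.floordiv_eq_ediv_of_pos (by norm_num)]
  have h1 := Int.ediv_add_emod j 10
  have h2 := Int.emod_nonneg j (b := 10) (by norm_num)
  have h3 := Int.emod_lt_of_pos j (b := 10) (by norm_num)
  omega

-- ===== PORT A =====
-- while j>0: k = j%10; j = j//10; num_list.append(k)
def digitsLoopA (j : Int) (numList : List Int) : List Int :=
  if h : 0 < j then
    digitsLoopA (PySem.Int.floordiv j 10) (numList ++ [PySem.Int.mod j 10])
  else numList
termination_by j.toNat
decreasing_by exact pvFdiv10_toNat_lt j h

-- for i in range(num+1): … return i; … return 0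
def loopA (num : Int) : List Int → Int
  | [] => 0
  | i :: rest =>
    if (digitsLoopA i []).sum + i = num then i else loopA num rest

def find_constructor (num : Int) : Int :=
  loopA num (PySem.List.pyRange 0 (num + 1) 1)

-- ===== PORT B =====
-- while t>0: d += 1; t //= 10
def countDigits (d t : Int) : Int :=
  if h : 0 < t then countDigits (d + 1) (PySem.Int.floordiv t 10) else d
termination_by t.toNat
decreasing_by exact pvFdiv10_toNat_lt t h

-- while j>0: s += j%10; j //= 10
def dsumLoop (s j : Int) : Int :=
  if h : 0 < j then dsumLoop (s + PySem.Int.mod j 10) (PySem.Int.floordiv j 10) else s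
termination_by j.toNat
decreasing_by exact pvFdiv10_toNat_lt j h

-- for i in range(start, num+1): … return i; … return 0
def loopB (num : Int) : List Int → Int
  | [] => 0
  | i :: rest =>
    if dsumLoop 0 i + i = num then i else loopB num rest

def find_constructor_alt (num : Int) : Int :=
  let d := countDigits 0 num
  let start0 := num - 9 * d
  let start := if start0 < 0 then 0 else start0
  loopB num (PySem.List.pyRange start (num + 1) 1)

-- ===== PRECONDITION & SPEC =====
def Spec_find_constructor (num : Int) (out : Int) : Prop := out = find_constructor_alt num
instance (num : Int) (out : Int) : Decidable (Spec_find_constructor num out) := by unfold Spec_find_constructor; infer_instance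

-- ===== CLAIM (what is proved, stated in full; the proofs are below) =====
def Claim_equal_find_constructor : Prop := ∀ (num : Int), Dom_find_constructor num → Spec_find_constructor num (find_constructor num)

-- ===== LEMMAS AND PROOFS =====

theorem countDigits_acc : ∀ (n : Nat) (t : Int), t.toNat = n → ∀ d, countDigits d t = d + countDigits 0 t := by
  intro n
  induction n using Nat.strong_induction_on with
  | _ n ih =>
    intro t hn d
    conv_lhs => rw [countDigits]
    conv_rhs => rw [countDigits]
    split_ifs with ht
    · have hlt := pvFdiv10_toNat_lt t ht
      rw [ih _ (by omega) _ rfl (d + 1), ih _ (by omega) _ rfl (0 + 1)]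
      ring
    · ring

theorem countDigits_nonneg : ∀ (n : Nat) (t : Int), t.toNat = n → 0 ≤ countDigits 0 t := by
  intro n
  induction n using Nat.strong_induction_on with
  | _ n ih =>
    intro t hn
    conv_rhs => rw [countDigits]
    split_ifs with ht
    · have hlt := pvFdiv10_toNat_lt t ht
      have := ih _ (by omega) (PySem.Int.floordiv t 10) rfl
      rw [countDigits_acc _ _ rfl]
      omega
    · omega

theorem countDigits_mono : ∀ (n : Nat) (j : Int), j.toNat = n →
    ∀ i : Int, 0 ≤ i → i ≤ j → countDigits 0 i ≤ countDigits 0 j := by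
  intro n
  induction n using Nat.strong_induction_on with
  | _ n ih =>
    intro j hn i hi hij
    by_cases hip : 0 < i
    · have hj : 0 < j := lt_of_lt_of_le hip hij
      conv_lhs => rw [countDigits, dif_pos hip]
      conv_rhs => rw [countDigits, dif_pos hj]
      rw [countDigits_acc _ _ rfl, countDigits_acc _ (PySem.Int.floordiv j 10) rfl]
      have hlt := pvFdiv10_toNat_lt j hj
      have hdiv : PySem.Int.floordiv i 10 ≤ PySem.Int.floordiv j 10 := by
        rw [PySem.Int.floordiv_eq_ediv_of_pos (by norm_num),
            PySem.Int.floordiv_eq_ediv_of_pos (by norm_num)]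
        exact Int.ediv_le_ediv (by norm_num) hij
      have hdn : 0 ≤ PySem.Int.floordiv i 10 := by
        rw [PySem.Int.floordiv_eq_ediv_of_pos (by norm_num)]
        exact Int.ediv_nonneg hi (by norm_num)
      have := ih _ (by omega) (PySem.Int.floordiv j 10) rfl (PySem.Int.floordiv i 10) hdn hdiv
      omega
    · have : i = 0 := by omega
      subst this
      conv_lhs => rw [countDigits, dif_neg (show ¬ (0:Int) < 0 by omega)]
      exact countDigits_nonneg _ j rfl

theorem dsumLoop_acc : ∀ (n : Nat) (j : Int), j.toNat = n → ∀ s, dsumLoop s j = s + dsumLoop 0 j := by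
  intro n
  induction n using Nat.strong_induction_on with
  | _ n ih =>
    intro j hn s
    conv_lhs => rw [dsumLoop]
    conv_rhs => rw [dsumLoop]
    split_ifs with hj
    · have hlt := pvFdiv10_toNat_lt j hj
      rw [ih _ (by omega) _ rfl (s + PySem.Int.mod j 10),
          ih _ (by omega) _ rfl (0 + PySem.Int.mod j 10)]
      ring
    · ring

theorem mod10_bounds (j : Int) : 0 ≤ PySem.Int.mod j 10 ∧ PySem.Int.mod j 10 ≤ 9 := by
  rw [PySem.Int.mod_eq_emod_of_pos (by norm_num)]
  have h1 := Int.emod_nonneg j (b := 10) (by norm_num)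
  have h2 := Int.emod_lt_of_pos j (b := 10) (by norm_num)
  omega

theorem dsumLoop_le : ∀ (n : Nat) (i : Int), i.toNat = n → 0 ≤ i →
    dsumLoop 0 i ≤ 9 * countDigits 0 i := by
  intro n
  induction n using Nat.strong_induction_on with
  | _ n ih =>
    intro i hn hi
    conv_lhs => rw [dsumLoop]
    conv_rhs => rw [countDigits]
    split_ifs with hip
    · have hlt := pvFdiv10_toNat_lt i hip
      have hdn : 0 ≤ PySem.Int.floordiv i 10 := by
        rw [PySem.Int.floordiv_eq_ediv_of_pos (by norm_num)]
        exact Int.ediv_nonneg hi (by norm_num)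
      have hrec := ih _ (by omega) (PySem.Int.floordiv i 10) rfl hdn
      have hm := mod10_bounds i
      rw [dsumLoop_acc _ _ rfl, countDigits_acc _ _ rfl]
      omega
    · omega

-- A's digit-list sum equals B's running digit sum
theorem digitsLoopA_sum : ∀ (n : Nat) (j : Int), j.toNat = n →
    ∀ acc : List Int, (digitsLoopA j acc).sum = acc.sum + dsumLoop 0 j := by
  intro n
  induction n using Nat.strong_induction_on with
  | _ n ih =>
    intro j hn acc
    conv_lhs => rw [digitsLoopA]
    conv_rhs => rw [dsumLoop]
    split_ifs with hj
    · have hlt := pvFdiv10_toNat_lt j hj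
      rw [ih _ (by omega) _ rfl,
          dsumLoop_acc (PySem.Int.floordiv j 10).toNat _ rfl (0 + PySem.Int.mod j 10)]
      simp [List.sum_append]
      ring
    · simp

theorem loopA_eq_loopB (num : Int) : ∀ l : List Int, loopA num l = loopB num l := by
  intro l
  induction l with
  | nil => rfl
  | cons i rest ihl =>
    rw [loopA, loopB]
    have h := digitsLoopA_sum i.toNat i rfl []
    simp at h
    rw [h, ihl]

theorem loopA_skip (num : Int) :
    ∀ (l l' : List Int), (∀ i ∈ l, (digitsLoopA i []).sum + i ≠ num) →
      loopA num (l ++ l') = loopA num l' := by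
  intro l l' h
  induction l with
  | nil => rfl
  | cons i rest ihl =>
    rw [List.cons_append, loopA, if_neg (h i (by simp))]
    exact ihl (fun x hx => h x (by simp [hx]))

-- ===== VERDICT (by name: the statement is the Claim_ definition above) =====
theorem find_constructor_spec : Claim_equal_find_constructor := by
  intro num _
  show find_constructor num = find_constructor_alt num
  rw [find_constructor, find_constructor_alt]
  have hd0 : 0 ≤ countDigits 0 num := countDigits_nonneg _ num rfl
  by_cases hneg : num - 9 * countDigits 0 num < 0
  · simp only [if_pos hneg]
    exact loopA_eq_loopB num _
  · simp only [if_neg hneg]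
    set start := num - 9 * countDigits 0 num with hstart
    have h1 : (0 : Int) ≤ start := by omega
    have h2 : start ≤ num + 1 := by omega
    rw [PySem.List.pyRange_one_append 0 start (num + 1) h1 h2]
    rw [loopA_skip num _ _ ?_, loopA_eq_loopB]
    intro i hi
    rw [PySem.List.mem_pyRange_one] at hi
    have hds := digitsLoopA_sum i.toNat i rfl []
    simp at hds
    rw [hds]
    have hle : dsumLoop 0 i ≤ 9 * countDigits 0 i := dsumLoop_le _ i rfl hi.1
    have hmono : countDigits 0 i ≤ countDigits 0 num :=
      countDigits_mono _ num rfl i hi.1 (by omega)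
    omega
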